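-- pv_equiv track=rewrite | github.com/klukas17/stopro-seminar | markov_chain_music_composition.py | distinguishSimultaneousEvents
-- ===== SOURCE A (Python) =====
-- def distinguishSimultaneousEvents(notes):
--
--     simultaneousEvents = []
--
--     atomarEvent = (0, [])
--
--     for note in notes:
--
--         if note[3] == 0:
--             atomarEvent[1].append((note[0], note[1], note[2]))
--
--         else:
--             simultaneousEvents.append(atomarEvent)
--             atomarEvent = (note[3], [])
--             atomarEvent[1].append((note[0], note[1], note[2]))
--
--     distuinguishedEvents = []
--
--     for e in simultaneousEvents:
--         onOffs = [x[0] for x in e[1]]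
--
--         if 'on' in onOffs and 'off' in onOffs:
--             eventOn = (0, [])
--             eventOff = (e[0], [])
--             for i in e[1]:
--                 if i[0] == "on":
--                     eventOn[1].append(i)
--                 else:
--                     eventOff[1].append(i)
--             distuinguishedEvents.append(eventOff)
--             distuinguishedEvents.append(eventOn)
--
--         else:
--             distuinguishedEvents.append(e)
--
--     for e in distuinguishedEvents:
--         e[1].sort()
--
--     return distuinguishedEvents
-- ===== SOURCE B (Python) =====
-- def distinguishSimultaneousEvents(notes):
--     # Single boundary-driven pass: groups are finalized (split/sorted) the moment
--     # the next group starts; the trailing group is never emitted, matching A.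
--     out = []
--     cur_id, cur = 0, []
--     for note in notes:
--         if note[3] == 0:
--             cur.append((note[0], note[1], note[2]))
--         else:
--             firsts = [x[0] for x in cur]
--             if 'on' in firsts and 'off' in firsts:
--                 out.append((cur_id, sorted(x for x in cur if x[0] != 'on')))
--                 out.append((0, sorted(x for x in cur if x[0] == 'on')))
--             else:
--                 out.append((cur_id, sorted(cur)))
--             cur_id, cur = note[3], [(note[0], note[1], note[2])]
--     return out
-- ===== Notes on version B (the rewrite author's own statement) =====
-- stated objective: simpler
-- what changed: B fuses A's three passes (build all groups, then split each on a second scan, then sort every list in a third) into one boundary-driven pass that splits with filters and sorts each event the moment its group is finalized, keeping only (current id, current notes) as state.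
import Mathlib
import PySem

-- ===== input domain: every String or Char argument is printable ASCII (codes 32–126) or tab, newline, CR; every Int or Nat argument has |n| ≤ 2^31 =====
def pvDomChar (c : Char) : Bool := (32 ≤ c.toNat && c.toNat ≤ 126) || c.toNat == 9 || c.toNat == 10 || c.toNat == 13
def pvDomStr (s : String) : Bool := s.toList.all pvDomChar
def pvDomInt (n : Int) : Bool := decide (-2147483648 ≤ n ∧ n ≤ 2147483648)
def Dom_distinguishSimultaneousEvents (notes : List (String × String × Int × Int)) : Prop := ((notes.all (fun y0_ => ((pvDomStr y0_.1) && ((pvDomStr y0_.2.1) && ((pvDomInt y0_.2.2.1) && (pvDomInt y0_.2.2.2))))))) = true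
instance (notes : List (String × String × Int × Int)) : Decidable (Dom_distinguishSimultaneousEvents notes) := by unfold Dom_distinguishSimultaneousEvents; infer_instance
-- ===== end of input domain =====

-- B fuses A's build/split/sort passes into one boundary-driven pass (same asymptotic cost; objective: simpler).


-- ===== PORT A =====
-- shared primitive: Python list.sort()/sorted() on (str,str,int) triples — lexicographic
-- tuple comparison, stable insertion sort (= PySem.List.sorted's foldl/insertBy form,
-- spelled with an explicit lexicographic test because Mathlib's Prod '<' is not Python's).
def pvLt3 (a b : String × String × Int) : Bool :=
  decide (a.1 < b.1) || (a.1 == b.1 &&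
    (decide (a.2.1 < b.2.1) || (a.2.1 == b.2.1 && decide (a.2.2 < b.2.2))))

def pvSort (l : List (String × String × Int)) : List (String × String × Int) :=
  l.foldl (fun acc x => PySem.List.insertBy pvLt3 x acc) []

def distinguishSimultaneousEvents (notes : List (String × String × Int × Int)) : List (Int × (List (String × String × Int))) :=
  -- first loop: build simultaneousEvents, dropping the trailing atomarEvent
  let p := notes.foldl
    (fun (st : List (Int × List (String × String × Int)) × Int × List (String × String × Int)) note =>
      if note.2.2.2 == 0 then
        (st.1, st.2.1, st.2.2 ++ [(note.1, note.2.1, note.2.2.1)])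
      else
        (st.1 ++ [(st.2.1, st.2.2)], note.2.2.2, [(note.1, note.2.1, note.2.2.1)]))
    ([], 0, [])
  -- second loop: split mixed on/off groups
  let distinguished := p.1.foldl
    (fun (acc : List (Int × List (String × String × Int))) e =>
      let onOffs := e.2.map (fun x => x.1)
      if onOffs.contains "on" && onOffs.contains "off" then
        let q := e.2.foldl
          (fun (pr : List (String × String × Int) × List (String × String × Int)) i =>
            if i.1 == "on" then (pr.1 ++ [i], pr.2) else (pr.1, pr.2 ++ [i]))
          ([], [])
        acc ++ [(e.1, q.2)] ++ [((0 : Int), q.1)]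
      else acc ++ [e]) []
  -- third loop: e[1].sort() in place on every event
  distinguished.map (fun e => (e.1, pvSort e.2))

-- ===== PORT B =====
def pvEmit (gid : Int) (cur : List (String × String × Int)) : List (Int × List (String × String × Int)) :=
  let firsts := cur.map (fun x => x.1)
  if firsts.contains "on" && firsts.contains "off" then
    [(gid, pvSort (cur.filter (fun x => x.1 != "on"))),
     ((0 : Int), pvSort (cur.filter (fun x => x.1 == "on")))]
  else
    [(gid, pvSort cur)]

def distinguishSimultaneousEvents_alt (notes : List (String × String × Int × Int)) : List (Int × (List (String × String × Int))) :=
  (notes.foldl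
    (fun (st : List (Int × List (String × String × Int)) × Int × List (String × String × Int)) note =>
      if note.2.2.2 == 0 then
        (st.1, st.2.1, st.2.2 ++ [(note.1, note.2.1, note.2.2.1)])
      else
        (st.1 ++ pvEmit st.2.1 st.2.2, note.2.2.2, [(note.1, note.2.1, note.2.2.1)]))
    ([], 0, [])).1

-- ===== PRECONDITION & SPEC =====
def Spec_distinguishSimultaneousEvents (notes : List (String × String × Int × Int)) (out : List (Int × (List (String × String × Int)))) : Prop := out = distinguishSimultaneousEvents_alt notes
instance (notes : List (String × String × Int × Int)) (out : List (Int × (List (String × String × Int)))) : Decidable (Spec_distinguishSimultaneousEvents notes out) := by unfold Spec_distinguishSimultaneousEvents; infer_instance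

-- ===== CLAIM (what is proved, stated in full; the proofs are below) =====
def Claim_equal_distinguishSimultaneousEvents : Prop := ∀ (notes : List (String × String × Int × Int)), Dom_distinguishSimultaneousEvents notes → Spec_distinguishSimultaneousEvents notes (distinguishSimultaneousEvents notes)

-- ===== LEMMAS AND PROOFS =====

-- abbreviations (proof-side only)
def pvLoopA (st : List (Int × List (String × String × Int)) × Int × List (String × String × Int))
    (note : String × String × Int × Int) :
    List (Int × List (String × String × Int)) × Int × List (String × String × Int) :=
  if note.2.2.2 == 0 then
    (st.1, st.2.1, st.2.2 ++ [(note.1, note.2.1, note.2.2.1)])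
  else
    (st.1 ++ [(st.2.1, st.2.2)], note.2.2.2, [(note.1, note.2.1, note.2.2.1)])

def pvLoopB (st : List (Int × List (String × String × Int)) × Int × List (String × String × Int))
    (note : String × String × Int × Int) :
    List (Int × List (String × String × Int)) × Int × List (String × String × Int) :=
  if note.2.2.2 == 0 then
    (st.1, st.2.1, st.2.2 ++ [(note.1, note.2.1, note.2.2.1)])
  else
    (st.1 ++ pvEmit st.2.1 st.2.2, note.2.2.2, [(note.1, note.2.1, note.2.2.1)])

-- A's second-loop per-group result
def pvSplitG (e : Int × List (String × String × Int)) : List (Int × List (String × String × Int)) :=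
  let onOffs := e.2.map (fun x => x.1)
  if onOffs.contains "on" && onOffs.contains "off" then
    let q := e.2.foldl
      (fun (pr : List (String × String × Int) × List (String × String × Int)) i =>
        if i.1 == "on" then (pr.1 ++ [i], pr.2) else (pr.1, pr.2 ++ [i]))
      ([], [])
    [(e.1, q.2), ((0 : Int), q.1)]
  else [e]

theorem pvPartition (l : List (String × String × Int))
    (a b : List (String × String × Int)) :
    l.foldl
      (fun (pr : List (String × String × Int) × List (String × String × Int)) i =>
        if i.1 == "on" then (pr.1 ++ [i], pr.2) else (pr.1, pr.2 ++ [i]))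
      (a, b)
    = (a ++ l.filter (fun x => x.1 == "on"), b ++ l.filter (fun x => x.1 != "on")) := by
  induction l generalizing a b with
  | nil => simp
  | cons h t ih =>
      rw [List.foldl_cons]
      by_cases hp : h.1 = "on"
      · have h1 : (h.1 == "on") = true := by simp [hp]
        rw [if_pos h1, ih]
        simp [hp, bne]
      · have h1 : ¬((h.1 == "on") = true) := by simp [hp]
        rw [if_neg h1, ih]
        simp [hp, bne]

theorem pvSplit_emit (e : Int × List (String × String × Int)) :
    (pvSplitG e).map (fun e => (e.1, pvSort e.2)) = pvEmit e.1 e.2 := by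
  unfold pvSplitG pvEmit
  by_cases hc : ((e.2.map (fun x => x.1)).contains "on" && (e.2.map (fun x => x.1)).contains "off") = true
  · rw [if_pos hc, if_pos hc, pvPartition]
    simp
  · rw [if_neg hc, if_neg hc]
    simp

-- accumulator lemmas for the two folds
theorem pvFoldA_acc (notes : List (String × String × Int × Int))
    (sim : List (Int × List (String × String × Int))) (gid : Int)
    (cur : List (String × String × Int)) :
    notes.foldl pvLoopA (sim, gid, cur)
      = (sim ++ (notes.foldl pvLoopA ([], gid, cur)).1, (notes.foldl pvLoopA ([], gid, cur)).2) := by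
  induction notes generalizing sim gid cur with
  | nil => simp
  | cons n t ih =>
      by_cases hc : n.2.2.2 == 0
      · simp only [List.foldl_cons, pvLoopA, hc, if_pos]
        exact ih sim gid (cur ++ [(n.1, n.2.1, n.2.2.1)])
      · simp only [List.foldl_cons, pvLoopA, hc, if_neg, Bool.false_eq_true, not_false_iff,
          List.nil_append]
        rw [ih (sim ++ [(gid, cur)]), ih [(gid, cur)]]
        simp

theorem pvFoldB_acc (notes : List (String × String × Int × Int))
    (acc : List (Int × List (String × String × Int))) (gid : Int)
    (cur : List (String × String × Int)) :
    notes.foldl pvLoopB (acc, gid, cur)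
      = (acc ++ (notes.foldl pvLoopB ([], gid, cur)).1, (notes.foldl pvLoopB ([], gid, cur)).2) := by
  induction notes generalizing acc gid cur with
  | nil => simp
  | cons n t ih =>
      by_cases hc : n.2.2.2 == 0
      · simp only [List.foldl_cons, pvLoopB, hc, if_pos]
        exact ih acc gid (cur ++ [(n.1, n.2.1, n.2.2.1)])
      · simp only [List.foldl_cons, pvLoopB, hc, if_neg, Bool.false_eq_true, not_false_iff,
          List.nil_append]
        rw [ih (acc ++ pvEmit gid cur), ih (pvEmit gid cur)]
        simp

-- the fused pass equals (split ∘ sort) of A's group list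
theorem pvMain (notes : List (String × String × Int × Int)) (gid : Int)
    (cur : List (String × String × Int)) :
    (notes.foldl pvLoopB ([], gid, cur)).1
      = ((notes.foldl pvLoopA ([], gid, cur)).1).flatMap (fun e => pvEmit e.1 e.2) := by
  induction notes generalizing gid cur with
  | nil => simp
  | cons n t ih =>
      by_cases hc : n.2.2.2 == 0
      · simp only [List.foldl_cons, pvLoopA, pvLoopB, hc, if_pos]
        exact ih gid (cur ++ [(n.1, n.2.1, n.2.2.1)])
      · simp only [List.foldl_cons, pvLoopA, pvLoopB, hc, if_neg, Bool.false_eq_true,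
          not_false_iff, List.nil_append]
        rw [pvFoldA_acc, pvFoldB_acc, ih]
        simp

-- A's second loop accumulates exactly the concatenation of the per-group splits
theorem pvSplitLoop (sim : List (Int × List (String × String × Int)))
    (acc : List (Int × List (String × String × Int))) :
    sim.foldl
      (fun (acc : List (Int × List (String × String × Int))) e =>
        let onOffs := e.2.map (fun x => x.1)
        if onOffs.contains "on" && onOffs.contains "off" then
          let q := e.2.foldl
            (fun (pr : List (String × String × Int) × List (String × String × Int)) i =>
              if i.1 == "on" then (pr.1 ++ [i], pr.2) else (pr.1, pr.2 ++ [i]))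
            ([], [])
          acc ++ [(e.1, q.2)] ++ [((0 : Int), q.1)]
        else acc ++ [e]) acc
      = acc ++ sim.flatMap pvSplitG := by
  induction sim generalizing acc with
  | nil => simp
  | cons e t ih =>
      rw [List.foldl_cons, ih, List.flatMap_cons]
      simp only [pvSplitG]
      by_cases hc : ((e.2.map (fun x => x.1)).contains "on" && (e.2.map (fun x => x.1)).contains "off") = true
      · rw [if_pos hc, if_pos hc]
        simp
      · rw [if_neg hc, if_neg hc]
        simp

-- ===== VERDICT (by name: the statement is the Claim_ definition above) =====
theorem distinguishSimultaneousEvents_spec : Claim_equal_distinguishSimultaneousEvents := by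
  intro notes _
  show distinguishSimultaneousEvents notes = distinguishSimultaneousEvents_alt notes
  show (((notes.foldl pvLoopA ([], 0, [])).1).foldl
      (fun (acc : List (Int × List (String × String × Int))) e =>
        let onOffs := e.2.map (fun x => x.1)
        if onOffs.contains "on" && onOffs.contains "off" then
          let q := e.2.foldl
            (fun (pr : List (String × String × Int) × List (String × String × Int)) i =>
              if i.1 == "on" then (pr.1 ++ [i], pr.2) else (pr.1, pr.2 ++ [i]))
            ([], [])
          acc ++ [(e.1, q.2)] ++ [((0 : Int), q.1)]
        else acc ++ [e]) []).map (fun e => (e.1, pvSort e.2))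
    = (notes.foldl pvLoopB ([], 0, [])).1
  rw [pvSplitLoop, List.nil_append, pvMain, List.map_flatMap]
  simp only [pvSplit_emit]
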